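-- pv_equiv track=rewrite | github.com/Aditya-Bichave/resume | .github/ats/ats_pro/scoring.py | _seniority_ok
-- ===== SOURCE A (Python) =====
-- from typing import Dict, List, Tuple, Optional
--
-- def _seniority_ok(resume_text: str, hint: Optional[str]) -> bool:
--     if not hint:
--         return True
--     low = resume_text.lower()
--     if hint in ["principal", "staff"]:
--         return any(w in low for w in ["principal","staff","lead","architect"])
--     if hint == "lead":
--         return any(w in low for w in ["lead","principal","staff"])
--     if hint == "senior":
--         return any(w in low for w in ["senior","lead","principal","staff"])
--     if hint == "junior":
--         return not any(w in low for w in ["senior","lead","principal","staff"])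
--     return True
-- ===== SOURCE B (Python) =====
-- def _seniority_ok(resume_text, hint):
--     if not hint:
--         return True
--     low = resume_text.lower()
--     level = 0
--     for kw, lvl in (("senior", 1), ("lead", 2), ("principal", 3), ("staff", 3)):
--         if kw in low and lvl > level:
--             level = lvl
--     if hint in ("principal", "staff"):
--         return level >= 2 or "architect" in low
--     if hint == "lead":
--         return level >= 2
--     if hint == "senior":
--         return level >= 1
--     if hint == "junior":
--         return level == 0
--     return True
-- ===== Notes on version B (the rewrite author's own statement) =====
-- stated objective: alternative
-- what changed: Instead of testing a per-hint keyword list (negated for junior), B scans the text once to compute a numeric seniority level (max rank of found keywords) and answers each hint by a threshold comparison, with junior as level == 0.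
import Mathlib
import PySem

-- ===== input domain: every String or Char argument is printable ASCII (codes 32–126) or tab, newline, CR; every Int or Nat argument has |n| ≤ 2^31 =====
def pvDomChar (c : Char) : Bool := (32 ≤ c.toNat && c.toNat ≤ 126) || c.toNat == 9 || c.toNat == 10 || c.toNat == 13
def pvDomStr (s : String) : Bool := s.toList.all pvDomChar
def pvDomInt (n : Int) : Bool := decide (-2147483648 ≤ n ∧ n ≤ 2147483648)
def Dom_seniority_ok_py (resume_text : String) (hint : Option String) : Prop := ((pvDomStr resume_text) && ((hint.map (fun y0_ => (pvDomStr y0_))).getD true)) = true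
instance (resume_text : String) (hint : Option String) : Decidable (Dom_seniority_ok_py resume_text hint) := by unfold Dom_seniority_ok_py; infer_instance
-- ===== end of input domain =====

-- B computes a numeric seniority level of the text once (max rank of found keywords) and answers hints by threshold comparison (alternative decomposition; return value only).


-- ===== PORT A =====
def seniority_ok_py (resume_text : String) (hint : Option String) : Bool :=
  match hint with
  | none => true
  | some h =>
    if h = "" then true
    else
      let low := PySem.Str.lower resume_text
      if ["principal", "staff"].contains h then
        (["principal", "staff", "lead", "architect"] : List String).any (fun w => PySem.Str.isIn w low)
      else if h = "lead" then
        (["lead", "principal", "staff"] : List String).any (fun w => PySem.Str.isIn w low)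
      else if h = "senior" then
        (["senior", "lead", "principal", "staff"] : List String).any (fun w => PySem.Str.isIn w low)
      else if h = "junior" then
        !((["senior", "lead", "principal", "staff"] : List String).any (fun w => PySem.Str.isIn w low))
      else true

-- ===== PORT B =====
def seniority_ok_py_alt (resume_text : String) (hint : Option String) : Bool :=
  match hint with
  | none => true
  | some h =>
    if h = "" then true
    else
      let low := PySem.Str.lower resume_text
      let level : Int :=
        ([("senior", (1 : Int)), ("lead", 2), ("principal", 3), ("staff", 3)]).foldl
          (fun level kl => if PySem.Str.isIn kl.1 low && decide (kl.2 > level) then kl.2 else level) 0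
      if h = "principal" || h = "staff" then decide (level ≥ 2) || PySem.Str.isIn "architect" low
      else if h = "lead" then decide (level ≥ 2)
      else if h = "senior" then decide (level ≥ 1)
      else if h = "junior" then decide (level = 0)
      else true

-- ===== PRECONDITION & SPEC =====
def Spec_seniority_ok_py (resume_text : String) (hint : Option String) (out : Bool) : Prop := out = seniority_ok_py_alt resume_text hint
instance (resume_text : String) (hint : Option String) (out : Bool) : Decidable (Spec_seniority_ok_py resume_text hint out) := by unfold Spec_seniority_ok_py; infer_instance

-- ===== CLAIM (what is proved, stated in full; the proofs are below) =====
def Claim_equal_seniority_ok_py : Prop := ∀ (resume_text : String) (hint : Option String), Dom_seniority_ok_py resume_text hint → Spec_seniority_ok_py resume_text hint (seniority_ok_py resume_text hint)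

-- ===== LEMMAS AND PROOFS =====

-- ===== VERDICT (by name: the statement is the Claim_ definition above) =====
theorem seniority_ok_py_spec : Claim_equal_seniority_ok_py := by
  intro resume_text hint _
  unfold Spec_seniority_ok_py seniority_ok_py seniority_ok_py_alt
  cases hint with
  | none => rfl
  | some h =>
    by_cases h0 : h = ""
    · simp [h0]
    by_cases h1 : h = "principal"
    · subst h1
      cases hs : PySem.Chars.isIn (['s','e','n','i','o','r'] : List Char) (PySem.Chars.lower resume_text.toList) <;>
      cases hl : PySem.Chars.isIn (['l','e','a','d'] : List Char) (PySem.Chars.lower resume_text.toList) <;>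
      cases hp : PySem.Chars.isIn (['p','r','i','n','c','i','p','a','l'] : List Char) (PySem.Chars.lower resume_text.toList) <;>
      cases hst : PySem.Chars.isIn (['s','t','a','f','f'] : List Char) (PySem.Chars.lower resume_text.toList) <;>
      cases har : PySem.Chars.isIn (['a','r','c','h','i','t','e','c','t'] : List Char) (PySem.Chars.lower resume_text.toList) <;>
      simp [hs, hl, hp, hst, har]
    by_cases h2 : h = "staff"
    · subst h2
      cases hs : PySem.Chars.isIn (['s','e','n','i','o','r'] : List Char) (PySem.Chars.lower resume_text.toList) <;>
      cases hl : PySem.Chars.isIn (['l','e','a','d'] : List Char) (PySem.Chars.lower resume_text.toList) <;>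
      cases hp : PySem.Chars.isIn (['p','r','i','n','c','i','p','a','l'] : List Char) (PySem.Chars.lower resume_text.toList) <;>
      cases hst : PySem.Chars.isIn (['s','t','a','f','f'] : List Char) (PySem.Chars.lower resume_text.toList) <;>
      cases har : PySem.Chars.isIn (['a','r','c','h','i','t','e','c','t'] : List Char) (PySem.Chars.lower resume_text.toList) <;>
      simp [hs, hl, hp, hst, har]
    by_cases h3 : h = "lead"
    · subst h3
      cases hs : PySem.Chars.isIn (['s','e','n','i','o','r'] : List Char) (PySem.Chars.lower resume_text.toList) <;>
      cases hl : PySem.Chars.isIn (['l','e','a','d'] : List Char) (PySem.Chars.lower resume_text.toList) <;>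
      cases hp : PySem.Chars.isIn (['p','r','i','n','c','i','p','a','l'] : List Char) (PySem.Chars.lower resume_text.toList) <;>
      cases hst : PySem.Chars.isIn (['s','t','a','f','f'] : List Char) (PySem.Chars.lower resume_text.toList) <;>
      simp [hs, hl, hp, hst]
    by_cases h4 : h = "senior"
    · subst h4
      cases hs : PySem.Chars.isIn (['s','e','n','i','o','r'] : List Char) (PySem.Chars.lower resume_text.toList) <;>
      cases hl : PySem.Chars.isIn (['l','e','a','d'] : List Char) (PySem.Chars.lower resume_text.toList) <;>
      cases hp : PySem.Chars.isIn (['p','r','i','n','c','i','p','a','l'] : List Char) (PySem.Chars.lower resume_text.toList) <;>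
      cases hst : PySem.Chars.isIn (['s','t','a','f','f'] : List Char) (PySem.Chars.lower resume_text.toList) <;>
      simp [hs, hl, hp, hst]
    by_cases h5 : h = "junior"
    · subst h5
      cases hs : PySem.Chars.isIn (['s','e','n','i','o','r'] : List Char) (PySem.Chars.lower resume_text.toList) <;>
      cases hl : PySem.Chars.isIn (['l','e','a','d'] : List Char) (PySem.Chars.lower resume_text.toList) <;>
      cases hp : PySem.Chars.isIn (['p','r','i','n','c','i','p','a','l'] : List Char) (PySem.Chars.lower resume_text.toList) <;>
      cases hst : PySem.Chars.isIn (['s','t','a','f','f'] : List Char) (PySem.Chars.lower resume_text.toList) <;>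
      simp [hs, hl, hp, hst]
    · simp [h0, h1, h2, h3, h4, h5]
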